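-- pv_equiv track=rewrite | github.com/frolovroman/django-pretty-admin | pretty_admin/dashboard.py | validate_table_data
-- ===== SOURCE A (Python) =====
-- def validate_table_data(table_data):
--     if len(table_data) < 2:
--         return False
--     head = table_data[0]
--     for line in table_data[1:]:
--         if len(line) != len(head):
--             return False
--     return True
-- ===== SOURCE B (Python) =====
-- def validate_table_data(table_data):
--     lengths = [len(r) for r in table_data]
--     return len(lengths) >= 2 and min(lengths) == max(lengths)
-- ===== Notes on version B (the rewrite author's own statement) =====
-- stated objective: alternative
-- what changed: Replaces A's head-anchored short-circuit comparison loop with an extremal test: project all rows to their lengths and require the minimum length to equal the maximum length (after the >=2 rows guard).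
import Mathlib
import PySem

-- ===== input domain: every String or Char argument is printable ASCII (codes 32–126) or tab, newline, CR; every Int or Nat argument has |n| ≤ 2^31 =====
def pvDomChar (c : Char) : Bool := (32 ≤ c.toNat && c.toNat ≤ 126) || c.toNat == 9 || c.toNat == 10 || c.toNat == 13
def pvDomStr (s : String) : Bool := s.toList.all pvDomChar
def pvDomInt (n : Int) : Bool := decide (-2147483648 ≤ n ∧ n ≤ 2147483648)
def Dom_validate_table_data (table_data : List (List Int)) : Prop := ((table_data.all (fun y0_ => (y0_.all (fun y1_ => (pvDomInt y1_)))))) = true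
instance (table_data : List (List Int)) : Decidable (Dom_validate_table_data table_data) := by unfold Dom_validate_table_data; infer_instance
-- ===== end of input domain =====

-- B replaces A's head-anchored short-circuit comparison loop with an extremal test over the projected length list (min == max); same cost.

-- ===== PORT A =====
-- the 'for line in table_data[1:]' loop with its early 'return False'
def vtdLoop (head : List Int) : List (List Int) → Bool
  | [] => true
  | line :: rest => if line.length ≠ head.length then false else vtdLoop head rest

def validate_table_data (table_data : List (List Int)) : Bool :=
  if table_data.length < 2 then false
  else
    match table_data with
    | [] => false   -- unreachable (length ≥ 2)
    | head :: _ => vtdLoop head (PySem.List.slice table_data (some 1) none)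

-- ===== PORT B =====
def validate_table_data_alt (table_data : List (List Int)) : Bool :=
  let lengths : List Int := table_data.map (fun r => (r.length : Int))
  decide (lengths.length ≥ 2) &&
    (PySem.List.min? lengths (fun x => x) == PySem.List.max? lengths (fun x => x))

-- ===== PRECONDITION & SPEC =====
def Spec_validate_table_data (table_data : List (List Int)) (out : Bool) : Prop := out = validate_table_data_alt table_data
instance (table_data : List (List Int)) (out : Bool) : Decidable (Spec_validate_table_data table_data out) := by unfold Spec_validate_table_data; infer_instance

-- ===== CLAIM (what is proved, stated in full; the proofs are below) =====
def Claim_equal_validate_table_data : Prop := ∀ (table_data : List (List Int)), Dom_validate_table_data table_data → Spec_validate_table_data table_data (validate_table_data table_data)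

-- ===== LEMMAS AND PROOFS =====

theorem vtdLoop_eq_all (head : List Int) (l : List (List Int)) :
    vtdLoop head l = l.all (fun line => line.length == head.length) := by
  induction l with
  | nil => rfl
  | cons x t ih =>
    simp [vtdLoop, List.all_cons, ih]
    by_cases h : x.length = head.length <;> simp [h]

-- min == max on a nonempty list iff every element equals the head
theorem minmax_eq_iff (a : Int) (t : List Int) :
    PySem.List.min? (a :: t) (fun x => x) = PySem.List.max? (a :: t) (fun x => x) ↔
      ∀ x ∈ (a :: t), x = a := by
  constructor
  · intro h x hx
    obtain ⟨m, hm⟩ : ∃ m, PySem.List.min? (a :: t) (fun x => x) = some m := by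
      cases he : PySem.List.min? (a :: t) (fun x => x) with
      | none => exact absurd ((PySem.List.min?_eq_none_iff _ _).mp he) (by simp)
      | some m => exact ⟨m, rfl⟩
    have hM : PySem.List.max? (a :: t) (fun x => x) = some m := h ▸ hm
    have hlo := PySem.List.min?_isMin hm
    have hhi := PySem.List.max?_isMax hM
    have hxm : x = m := le_antisymm (hhi x hx) (hlo x hx)
    have ham : a = m := le_antisymm (hhi a (by simp)) (hlo a (by simp))
    rw [hxm, ham]
  · intro h
    obtain ⟨m, hm⟩ : ∃ m, PySem.List.min? (a :: t) (fun x => x) = some m := by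
      cases he : PySem.List.min? (a :: t) (fun x => x) with
      | none => exact absurd ((PySem.List.min?_eq_none_iff _ _).mp he) (by simp)
      | some m => exact ⟨m, rfl⟩
    obtain ⟨M, hM⟩ : ∃ M, PySem.List.max? (a :: t) (fun x => x) = some M := by
      cases he : PySem.List.max? (a :: t) (fun x => x) with
      | none => exact absurd ((PySem.List.max?_eq_none_iff _ _).mp he) (by simp)
      | some M => exact ⟨M, rfl⟩
    have h1 := h m (PySem.List.min?_mem hm)
    have h2 := h M (PySem.List.max?_mem hM)
    rw [hm, hM, h1, h2]

-- ===== VERDICT (by name: the statement is the Claim_ definition above) =====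
theorem validate_table_data_spec : Claim_equal_validate_table_data := by
  unfold Claim_equal_validate_table_data
  intro td _
  unfold Spec_validate_table_data validate_table_data validate_table_data_alt
  match td with
  | [] => simp [PySem.List.min?, PySem.List.max?]
  | [h] => simp
  | h :: x :: t =>
    have hlen : ¬ (h :: x :: t).length < 2 := by simp
    simp only [hlen, if_false]
    have hslice : PySem.List.slice (h :: x :: t) (some 1) none = x :: t := by
      simp [PySem.List.slice_from_one]
    rw [hslice, vtdLoop_eq_all]
    simp only [List.map_cons, List.length_cons]
    rw [Bool.eq_iff_iff]
    simp only [Bool.and_eq_true, decide_eq_true_eq, List.all_eq_true, beq_iff_eq, beq_iff_eq]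
    rw [minmax_eq_iff]
    constructor
    · intro hh
      refine ⟨by omega, ?_⟩
      intro y hy
      simp only [List.mem_cons, List.mem_map] at hy
      rcases hy with hy | hy | ⟨r, hr, hry⟩
      · exact hy
      · have := hh x (by simp); omega
      · have := hh r (by simp [hr]); omega
    · rintro ⟨-, hh⟩ r hr
      rw [List.mem_cons] at hr
      have := hh (r.length : Int) (by
        simp only [List.mem_cons, List.mem_map]
        rcases hr with hr | hr
        · right; left; rw [hr]
        · right; right; exact ⟨r, hr, rfl⟩)
      omega
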